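-- pv_equiv track=rewrite | github.com/J99-t/PY100 | book_exercises/practice.py | nested_numbers
-- ===== SOURCE A (Python) =====
-- def nested_numbers(loops):
--     new_list = []
--     for number in range(1,loops+1):
--         add_num = []
--         for element in range(1,number+1):
--             add_num.append(element)
--         new_list.append(add_num)
--     return new_list
-- ===== SOURCE B (Python) =====
-- def nested_numbers(loops):
--     new_list = []
--     row = []
--     for number in range(1, loops + 1):
--         row = row + [number]
--         new_list.append(row)
--     return new_list
-- ===== Notes on version B (the rewrite author's own statement) =====
-- stated objective: simpler
-- what changed: Single accumulating pass that extends a running prefix row (row = row + [number]) and appends it, instead of an inner counting loop rebuilding each row from scratch.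
import Mathlib
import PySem

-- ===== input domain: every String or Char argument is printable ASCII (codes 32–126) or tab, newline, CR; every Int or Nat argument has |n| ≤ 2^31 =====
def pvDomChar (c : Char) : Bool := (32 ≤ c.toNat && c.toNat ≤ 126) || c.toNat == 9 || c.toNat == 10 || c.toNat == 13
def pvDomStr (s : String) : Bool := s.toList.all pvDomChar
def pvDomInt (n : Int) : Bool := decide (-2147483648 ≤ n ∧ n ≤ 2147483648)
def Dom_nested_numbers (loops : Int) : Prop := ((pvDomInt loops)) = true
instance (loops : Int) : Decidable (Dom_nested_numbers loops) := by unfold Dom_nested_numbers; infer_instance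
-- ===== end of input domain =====

-- B: single pass extending a running prefix row, no inner counting loop (different decomposition).

-- ===== PORT A =====
-- literal transliteration: outer loop over range(1, loops+1), inner loop appending 1..number
def nested_numbers (loops : Int) : List (List Int) :=
  (PySem.List.pyRange 1 (loops + 1) 1).foldl
    (fun new_list number =>
      new_list ++ [(PySem.List.pyRange 1 (number + 1) 1).foldl (fun add_num element => add_num ++ [element]) []])
    []

-- ===== PORT B =====
-- single pass: state (row, new_list); row = row + [number], then append row
def nested_numbers_alt (loops : Int) : List (List Int) :=
  ((PySem.List.pyRange 1 (loops + 1) 1).foldl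
    (fun (st : List Int × List (List Int)) number =>
      let row := st.1 ++ [number]
      (row, st.2 ++ [row]))
    ([], [])).2

-- ===== PRECONDITION & SPEC =====
def Spec_nested_numbers (loops : Int) (out : List (List Int)) : Prop := out = nested_numbers_alt loops
instance (loops : Int) (out : List (List Int)) : Decidable (Spec_nested_numbers loops out) := by unfold Spec_nested_numbers; infer_instance

-- ===== CLAIM (what is proved, stated in full; the proofs are below) =====
def Claim_equal_nested_numbers : Prop := ∀ (loops : Int), Dom_nested_numbers loops → Spec_nested_numbers loops (nested_numbers loops)

-- ===== LEMMAS AND PROOFS =====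

-- common normal form: the list of rows [1..1], [1..2], …, [1..n]
def pvRows : Nat → List (List Int)
  | 0 => []
  | n + 1 => pvRows n ++ [PySem.List.pyRange 1 ((n : Int) + 2) 1]

theorem pv_foldl_snoc (l init : List Int) :
    l.foldl (fun acc e => acc ++ [e]) init = init ++ l := by
  induction l generalizing init with
  | nil => simp
  | cons x xs ih => simp [List.foldl, ih]

theorem pv_A_eq (n : Nat) :
    (PySem.List.pyRange 1 (1 + (n : Int)) 1).foldl
      (fun new_list number =>
        new_list ++ [(PySem.List.pyRange 1 (number + 1) 1).foldl (fun add_num element => add_num ++ [element]) []])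
      [] = pvRows n := by
  induction n with
  | zero => simp [pvRows]
  | succ n ih =>
    have h1 : (1 : Int) + ((n : Int) + 1) = (1 + (n : Int)) + 1 := by ring
    rw [show ((n + 1 : Nat) : Int) = (n : Int) + 1 by push_cast; ring, h1,
        PySem.List.pyRange_one_succ_right (by omega : (1:Int) ≤ 1 + (n : Int)),
        List.foldl_append, ih]
    simp only [List.foldl, pv_foldl_snoc, List.nil_append, pvRows]
    rw [show ((n : Int) + 2) = (1 + (n : Int)) + 1 by ring,
        PySem.List.pyRange_one_succ_right (by omega : (1:Int) ≤ 1 + (n : Int))]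

theorem pv_B_eq (n : Nat) :
    (PySem.List.pyRange 1 (1 + (n : Int)) 1).foldl
      (fun (st : List Int × List (List Int)) number =>
        let row := st.1 ++ [number]
        (row, st.2 ++ [row]))
      ([], []) = (PySem.List.pyRange 1 (1 + (n : Int)) 1, pvRows n) := by
  induction n with
  | zero => simp [pvRows]
  | succ n ih =>
    have h1 : (1 : Int) + ((n : Int) + 1) = (1 + (n : Int)) + 1 := by ring
    rw [show ((n + 1 : Nat) : Int) = (n : Int) + 1 by push_cast; ring, h1]
    rw [PySem.List.pyRange_one_succ_right (by omega : (1:Int) ≤ 1 + (n : Int)),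
        List.foldl_append, ih]
    simp only [List.foldl, pvRows]
    rw [show ((n : Int) + 2) = (1 + (n : Int)) + 1 by ring,
        PySem.List.pyRange_one_succ_right (by omega : (1:Int) ≤ 1 + (n : Int))]

-- ===== VERDICT (by name: the statement is the Claim_ definition above) =====
theorem nested_numbers_spec : Claim_equal_nested_numbers := by
  intro loops _
  unfold Spec_nested_numbers nested_numbers nested_numbers_alt
  by_cases h : loops ≤ 0
  · rw [PySem.List.pyRange_one_eq_nil (by omega : loops + 1 ≤ 1)]
    rfl
  · obtain ⟨n, hn⟩ : ∃ n : Nat, loops = (n : Int) :=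
      ⟨loops.toNat, (Int.toNat_of_nonneg (by omega)).symm⟩
    subst hn
    rw [show ((n : Int) + 1) = 1 + (n : Int) by ring, pv_A_eq, pv_B_eq]
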